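-- pv_equiv track=rewrite | github.com/Neimhin/scalable-project-3-group-17 | g17icn.py | initialize_adjacency_matrix
-- ===== SOURCE A (Python) =====
-- def initialize_adjacency_matrix(n):
--     # Initialize an n x n matrix filled with zeros
--     adj_matrix = [[0] * n for _ in range(n)]
--
--     # Fill the adjacency matrix to represent linear connections
--     for i in range(n):
--         if i > 0:
--             adj_matrix[i][i - 1] = 1  # Connect to the previous node
--         if i < n - 1:
--             adj_matrix[i][i + 1] = 1  # Connect to the next node
--
--     return adj_matrix
-- ===== SOURCE B (Python) =====
-- def initialize_adjacency_matrix(n):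
--     # Per-cell predicate sweep: a cell of a linear chain is set iff its indices are adjacent.
--     return [[1 if abs(i - j) == 1 else 0 for j in range(n)] for i in range(n)]
-- ===== Notes on version B (the rewrite author's own statement) =====
-- stated objective: simpler
-- what changed: B builds the matrix in one nested comprehension from the closed-form per-cell band predicate (a cell is set exactly when its row and column indices are adjacent), instead of A's allocate-zeros-then-sparsely-mutate two off-diagonal writes per row.
import Mathlib
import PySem

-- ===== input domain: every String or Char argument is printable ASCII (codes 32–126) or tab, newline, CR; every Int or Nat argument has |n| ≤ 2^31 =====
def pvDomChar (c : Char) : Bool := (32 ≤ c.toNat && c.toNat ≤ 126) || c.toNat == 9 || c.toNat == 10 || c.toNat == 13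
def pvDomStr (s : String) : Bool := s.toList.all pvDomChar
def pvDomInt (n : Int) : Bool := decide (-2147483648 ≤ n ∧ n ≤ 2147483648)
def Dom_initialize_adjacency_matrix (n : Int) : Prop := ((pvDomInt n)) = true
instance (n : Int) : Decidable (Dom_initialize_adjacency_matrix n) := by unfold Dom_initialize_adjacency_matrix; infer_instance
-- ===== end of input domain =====

-- B builds each cell from the closed-form band predicate (indices adjacent) in one nested
-- comprehension, instead of A's allocate-zeros-then-sparsely-mutate fill; objective: simpler.

-- ===== PORT A =====
-- adj_matrix[i][j] = 1  (in-place write; both indices are in range whenever A performs it)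
def pvSetCell (m : List (List Int)) (i j : Nat) : List (List Int) :=
  m.modify i (fun row => row.set j 1)

def initialize_adjacency_matrix (n : Int) : List (List Int) :=
  -- adj_matrix = [[0] * n for _ in range(n)]
  let adj := (PySem.List.pyRange 0 n 1).map (fun _ => List.replicate n.toNat 0)
  -- for i in range(n): two sparse band writes per row
  (PySem.List.pyRange 0 n 1).foldl (fun m i =>
    let m1 := if 0 < i then pvSetCell m i.toNat (i - 1).toNat else m
    if i < n - 1 then pvSetCell m1 i.toNat (i + 1).toNat else m1) adj

-- ===== PORT B =====
def initialize_adjacency_matrix_alt (n : Int) : List (List Int) :=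
  (PySem.List.pyRange 0 n 1).map (fun i =>
    (PySem.List.pyRange 0 n 1).map (fun j => if (i - j).natAbs = 1 then 1 else 0))

-- ===== PRECONDITION & SPEC =====
def Spec_initialize_adjacency_matrix (n : Int) (out : List (List Int)) : Prop := out = initialize_adjacency_matrix_alt n
instance (n : Int) (out : List (List Int)) : Decidable (Spec_initialize_adjacency_matrix n out) := by unfold Spec_initialize_adjacency_matrix; infer_instance

-- ===== CLAIM (what is proved, stated in full; the proofs are below) =====
def Claim_equal_initialize_adjacency_matrix : Prop := ∀ (n : Int), Dom_initialize_adjacency_matrix n → Spec_initialize_adjacency_matrix n (initialize_adjacency_matrix n)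

-- ===== LEMMAS AND PROOFS =====

-- the intended row i of the n×n chain matrix
def pvRow (m i : Nat) : List Int :=
  (List.range m).map (fun (j : Nat) => if ((i : Int) - (j : Int)).natAbs = 1 then 1 else 0)

-- A's matrix after the loop has processed rows 0..k-1
def pvState (m k : Nat) : List (List Int) :=
  (List.range m).map (fun i => if i < k then pvRow m i else List.replicate m 0)

theorem pvRow_length (m k : Nat) : (pvRow m k).length = m := by
  simp [pvRow]

theorem pvRow_getElem (m k j : Nat) (h' : j < (pvRow m k).length) :
    (pvRow m k)[j] = if ((k : Int) - (j : Int)).natAbs = 1 then 1 else 0 := by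
  simp only [pvRow]
  rw [List.getElem_map, List.getElem_range]

theorem pv_modify_map_range {α : Type} (m k : Nat) (f : Nat → α) (g : α → α) :
    ((List.range m).map f).modify k g =
      (List.range m).map (fun i => if i = k then g (f i) else f i) := by
  apply List.ext_getElem
  · simp
  · intro j h1 h2
    rw [List.getElem_modify]
    simp only [List.getElem_map, List.getElem_range]
    by_cases h : j = k
    · subst h; simp
    · rw [if_neg h, if_neg (fun hh => h hh.symm)]

theorem pv_row_eq (m k : Nat) (hk : k < m) :
    (if (k : Int) < (m : Int) - 1 then
        (if (0 : Int) < (k : Int) then (List.replicate m (0 : Int)).set (k - 1) 1 else List.replicate m 0).set (k + 1) 1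
      else
        (if (0 : Int) < (k : Int) then (List.replicate m (0 : Int)).set (k - 1) 1 else List.replicate m 0)) = pvRow m k := by
  apply List.ext_getElem
  · rw [pvRow_length]; split_ifs <;> simp
  · intro j h1 h2
    rw [pvRow_getElem]
    have hjm : j < m := by rw [pvRow_length] at h2; exact h2
    split_ifs with c1 c2 c3 <;>
      simp only [List.getElem_set, List.getElem_replicate] <;>
      split_ifs <;> omega

theorem pv_step (m k : Nat) (hk : k < m) :
    (let m1 := if (0 : Int) < ((k : Nat) : Int) then pvSetCell (pvState m k) (((k : Nat) : Int)).toNat ((((k : Nat) : Int)) - 1).toNat else pvState m k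
     if (((k : Nat) : Int)) < (m : Int) - 1 then pvSetCell m1 (((k : Nat) : Int)).toNat ((((k : Nat) : Int)) + 1).toNat else m1)
      = pvState m (k + 1) := by
  have e1 : (((k : Nat) : Int)).toNat = k := Int.toNat_natCast k
  have e2 : ((((k : Nat) : Int)) - 1).toNat = k - 1 := by omega
  have e3 : ((((k : Nat) : Int)) + 1).toNat = k + 1 := by omega
  have hr := pv_row_eq m k hk
  simp only [e1, e2, e3]
  by_cases c1 : (0 : Int) < ((k : Nat) : Int) <;> by_cases c2 : (((k : Nat) : Int)) < (m : Int) - 1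
  · rw [if_pos c2, if_pos c1] at hr
    simp only [if_pos c1, if_pos c2, pvSetCell, pvState, pv_modify_map_range]
    apply List.map_congr_left
    intro i hi
    rw [List.mem_range] at hi
    by_cases h : i = k
    · subst h
      simp only [if_neg (Nat.lt_irrefl i), if_pos (Nat.lt_succ_self i)]
      exact hr
    · simp only [if_neg h, show (i < k + 1) ↔ (i < k) from by omega]
  · rw [if_neg c2, if_pos c1] at hr
    simp only [if_pos c1, if_neg c2, pvSetCell, pvState, pv_modify_map_range]
    apply List.map_congr_left
    intro i hi
    rw [List.mem_range] at hi
    by_cases h : i = k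
    · subst h
      simp only [if_neg (Nat.lt_irrefl i), if_pos (Nat.lt_succ_self i)]
      exact hr
    · simp only [if_neg h, show (i < k + 1) ↔ (i < k) from by omega]
  · rw [if_pos c2, if_neg c1] at hr
    simp only [if_neg c1, if_pos c2, pvSetCell, pvState, pv_modify_map_range]
    apply List.map_congr_left
    intro i hi
    rw [List.mem_range] at hi
    by_cases h : i = k
    · subst h
      simp only [if_neg (Nat.lt_irrefl i), if_pos (Nat.lt_succ_self i)]
      exact hr
    · simp only [if_neg h, show (i < k + 1) ↔ (i < k) from by omega]
  · rw [if_neg c2, if_neg c1] at hr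
    simp only [if_neg c1, if_neg c2, pvState]
    apply List.map_congr_left
    intro i hi
    rw [List.mem_range] at hi
    by_cases h : i = k
    · subst h
      simp only [if_neg (Nat.lt_irrefl i), if_pos (Nat.lt_succ_self i)]
      exact hr
    · simp only [show (i < k + 1) ↔ (i < k) from by omega]

theorem pv_fold_inv (m k : Nat) (hk : k ≤ m) :
    (List.range k).foldl (fun mat (k' : Nat) =>
      (let m1 := if (0 : Int) < ((k' : Nat) : Int) then pvSetCell mat (((k' : Nat) : Int)).toNat ((((k' : Nat) : Int)) - 1).toNat else mat
       if (((k' : Nat) : Int)) < (m : Int) - 1 then pvSetCell m1 (((k' : Nat) : Int)).toNat ((((k' : Nat) : Int)) + 1).toNat else m1))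
      (pvState m 0) = pvState m k := by
  induction k with
  | zero => simp
  | succ k ih =>
    rw [List.range_succ, List.foldl_append, ih (Nat.le_of_succ_le hk)]
    simpa using pv_step m k (by omega)

theorem initialize_adjacency_matrix_eq (n : Int) :
    initialize_adjacency_matrix n = initialize_adjacency_matrix_alt n := by
  by_cases h : n ≤ 0
  · simp [initialize_adjacency_matrix, initialize_adjacency_matrix_alt,
      PySem.List.pyRange_one_eq_nil (by omega : n ≤ 0)]
  · obtain ⟨m, rfl⟩ : ∃ m : Nat, n = (m : Int) := ⟨n.toNat, by omega⟩
    unfold initialize_adjacency_matrix initialize_adjacency_matrix_alt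
    rw [PySem.List.pyRange_zero_natCast]
    simp only [List.foldl_map, List.map_map]
    have hinit : (List.range m).map ((fun _ => List.replicate ((m : Int)).toNat (0 : Int)) ∘ (fun k : Nat => (k : Int))) = pvState m 0 := by
      simp [pvState, Function.comp_def]
    rw [hinit, pv_fold_inv m m (le_refl m)]
    unfold pvState pvRow
    apply List.map_congr_left
    intro i hi
    rw [List.mem_range] at hi
    rw [if_pos hi]
    simp [Function.comp_def]

-- ===== VERDICT (by name: the statement is the Claim_ definition above) =====
theorem initialize_adjacency_matrix_spec : Claim_equal_initialize_adjacency_matrix := by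
  intro n _
  exact initialize_adjacency_matrix_eq n
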